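-- pv_equiv track=rewrite | github.com/noudald/project-euler | 814/main.py | gen_all_edges
-- ===== SOURCE A (Python) =====
-- def gen_all_edges(n, nodes):
--     if len(nodes) == 0:
--         return [[]]
--
--     node = nodes[0]
--     e1 = (node, (node + 1) % (4*n))
--     e2 = (node, (node - 1) % (4*n))
--     e3 = (node, (node + 2*n) % (4*n))
--
--     all_edges = []
--     for edges in gen_all_edges(n, nodes[1:]):
--         all_edges.append([e1] + edges)
--         all_edges.append([e2] + edges)
--         all_edges.append([e3] + edges)
--
--     return all_edges
-- ===== SOURCE B (Python) =====
-- def gen_all_edges(n, nodes):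
--     m = 4 * n
--     acc = [[]]
--     for v in reversed(nodes):
--         es = [(v, (v + 1) % m), (v, (v - 1) % m), (v, (v + 2 * n) % m)]
--         acc = [[e] + edges for edges in acc for e in es]
--     return acc
-- ===== Notes on version B (the rewrite author's own statement) =====
-- stated objective: alternative
-- what changed: Replaces A's recursion (recurse on the tail, then an explicit loop appending three extended copies) with a single iterative right-to-left pass: one accumulator of partial edge lists, extended by a flat comprehension per node.
import Mathlib
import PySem

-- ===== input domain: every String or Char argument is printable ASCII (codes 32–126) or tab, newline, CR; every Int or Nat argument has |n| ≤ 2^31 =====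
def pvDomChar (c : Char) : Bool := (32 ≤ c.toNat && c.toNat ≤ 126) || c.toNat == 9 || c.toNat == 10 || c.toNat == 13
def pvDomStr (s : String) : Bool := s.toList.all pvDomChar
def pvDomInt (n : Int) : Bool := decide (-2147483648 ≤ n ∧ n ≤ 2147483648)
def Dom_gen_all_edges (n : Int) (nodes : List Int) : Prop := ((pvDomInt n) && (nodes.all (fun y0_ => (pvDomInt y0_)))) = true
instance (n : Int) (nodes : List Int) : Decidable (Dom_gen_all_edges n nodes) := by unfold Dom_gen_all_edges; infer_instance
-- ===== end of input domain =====

-- B replaces A's tail-recursion-plus-append-loop by one iterative right-to-left pass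
-- with an accumulator of partial edge lists (objective: alternative decomposition).


-- ===== PORT A =====
def gen_all_edges (n : Int) (nodes : List Int) : List (List (Int × Int)) :=
  match nodes with
  | [] => [[]]
  | node :: rest =>
    let e1 : Int × Int := (node, PySem.Int.mod (node + 1) (4 * n))
    let e2 : Int × Int := (node, PySem.Int.mod (node - 1) (4 * n))
    let e3 : Int × Int := (node, PySem.Int.mod (node + 2 * n) (4 * n))
    List.foldl
      (fun all_edges edges => all_edges ++ [e1 :: edges, e2 :: edges, e3 :: edges])
      [] (gen_all_edges n rest)

-- ===== PORT B =====
def gen_all_edges_alt (n : Int) (nodes : List Int) : List (List (Int × Int)) :=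
  let m := 4 * n
  List.foldl
    (fun acc v =>
      let es : List (Int × Int) :=
        [(v, PySem.Int.mod (v + 1) m), (v, PySem.Int.mod (v - 1) m), (v, PySem.Int.mod (v + 2 * n) m)]
      acc.flatMap (fun edges => es.map (fun e => e :: edges)))
    [[]] nodes.reverse

-- ===== PRECONDITION & SPEC =====
-- Pre_ excludes only n = 0 with nonempty nodes, where Python's `% (4*n)` raises ZeroDivisionError.
def Pre_gen_all_edges (n : Int) (nodes : List Int) : Prop := n ≠ 0 ∨ nodes = []
instance (n : Int) (nodes : List Int) : Decidable (Pre_gen_all_edges n nodes) := by unfold Pre_gen_all_edges; infer_instance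
def pvWitness_gen_all_edges : Int × List Int := (2, [0, 3, 5])
def Spec_gen_all_edges (n : Int) (nodes : List Int) (out : List (List (Int × Int))) : Prop := out = gen_all_edges_alt n nodes
instance (n : Int) (nodes : List Int) (out : List (List (Int × Int))) : Decidable (Spec_gen_all_edges n nodes out) := by unfold Spec_gen_all_edges; infer_instance

-- ===== CLAIM (what is proved, stated in full; the proofs are below) =====
def Claim_equal_gen_all_edges : Prop := ∀ (n : Int) (nodes : List Int), Dom_gen_all_edges n nodes → Pre_gen_all_edges n nodes → Spec_gen_all_edges n nodes (gen_all_edges n nodes)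

-- ===== LEMMAS AND PROOFS =====

-- B's loop as a foldr (loop over reversed(nodes) = foldr over nodes)
theorem gen_all_edges_alt_eq_foldr (n : Int) (nodes : List Int) :
    gen_all_edges_alt n nodes =
      List.foldr
        (fun v acc =>
          acc.flatMap (fun edges =>
            ([(v, PySem.Int.mod (v + 1) (4 * n)), (v, PySem.Int.mod (v - 1) (4 * n)),
              (v, PySem.Int.mod (v + 2 * n) (4 * n))] : List (Int × Int)).map (fun e => e :: edges)))
        [[]] nodes := by
  simp [gen_all_edges_alt, List.foldl_reverse]

-- A's append-loop over a list is a flatMap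
theorem foldl_append3 (e1 e2 e3 : Int × Int) (l : List (List (Int × Int))) :
    List.foldl (fun all_edges edges => all_edges ++ [e1 :: edges, e2 :: edges, e3 :: edges]) [] l =
      l.flatMap (fun edges => [e1 :: edges, e2 :: edges, e3 :: edges]) := by
  simpa using PySem.List.foldl_append_eq_flatMap (g := fun edges => [e1 :: edges, e2 :: edges, e3 :: edges]) (l := l) (acc := [])

theorem gen_all_edges_eq_alt (n : Int) (nodes : List Int) :
    gen_all_edges n nodes = gen_all_edges_alt n nodes := by
  rw [gen_all_edges_alt_eq_foldr]
  induction nodes with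
  | nil => simp [gen_all_edges]
  | cons v rest ih =>
    simp only [gen_all_edges, List.foldr_cons, ← ih, foldl_append3]
    rfl

-- ===== VERDICT (by name: the statement is the Claim_ definition above) =====
theorem gen_all_edges_spec : Claim_equal_gen_all_edges := by
  intro n nodes _ _
  exact gen_all_edges_eq_alt n nodes
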